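-- pv_equiv track=rewrite | github.com/todopce2-sys/chatbot-antigravity | fase2_chatbot_ecommerce.py | buscar_productos
-- ===== SOURCE A (Python) =====
-- def buscar_productos(pregunta, productos, max_resultados=10):
--     palabras = pregunta.lower().split()
--     resultados = []
--     for p in productos:
--         texto = (p["nombre"] + " " + p["categoria"]).lower()
--         puntaje = sum(1 for palabra in palabras if palabra in texto)
--         if puntaje > 0:
--             resultados.append((puntaje, p))
--     resultados.sort(key=lambda x: x[0], reverse=True)
--     return [p for _, p in resultados[:max_resultados]]
-- ===== SOURCE B (Python) =====
-- def buscar_productos(pregunta, productos, max_resultados=10):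
--     palabras = pregunta.lower().split()
--     puntuados = [(sum(1 for w in palabras
--                       if w in (p["nombre"] + " " + p["categoria"]).lower()), p)
--                  for p in productos]
--     res = []
--     for s in range(len(palabras), 0, -1):
--         for sc, p in puntuados:
--             if sc == s:
--                 res.append(p)
--     return res[:max_resultados]
-- ===== Notes on version B (the rewrite author's own statement) =====
-- stated objective: alternative
-- what changed: B replaces A's stable comparison sort of (score, product) pairs by a bucket traversal: it scores every product once, then walks the possible scores from len(palabras) down to 1, collecting products with that exact score in original order, which reproduces the stable descending order without sorting.
import Mathlib
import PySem

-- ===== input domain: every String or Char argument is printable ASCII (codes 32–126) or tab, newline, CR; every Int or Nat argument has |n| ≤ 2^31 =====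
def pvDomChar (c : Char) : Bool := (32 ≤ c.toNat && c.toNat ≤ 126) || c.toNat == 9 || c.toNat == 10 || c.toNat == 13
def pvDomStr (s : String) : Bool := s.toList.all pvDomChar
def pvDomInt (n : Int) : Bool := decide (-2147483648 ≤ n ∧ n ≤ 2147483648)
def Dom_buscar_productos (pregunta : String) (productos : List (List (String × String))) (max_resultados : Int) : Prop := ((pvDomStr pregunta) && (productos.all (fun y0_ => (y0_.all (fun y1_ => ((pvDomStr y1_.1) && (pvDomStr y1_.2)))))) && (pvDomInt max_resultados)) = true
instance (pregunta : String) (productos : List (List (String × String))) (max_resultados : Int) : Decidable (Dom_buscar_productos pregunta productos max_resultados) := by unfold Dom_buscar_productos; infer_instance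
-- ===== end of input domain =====

-- B replaces A's comparison sort of (score, product) pairs by per-score filter passes over the
-- scored list, walking the possible scores in descending order (a bucket/counting traversal);
-- objective: alternative — same results, structurally different, not claimed faster.

-- shared scoring helper: puntaje = sum(1 for palabra in palabras if palabra in texto),
-- texto = (p["nombre"] + " " + p["categoria"]).lower() — both Pythons compute it this way
def puntaje_de (palabras : List String) (p : List (String × String)) : Int :=
  let texto := PySem.Str.lower (PySem.Str.join "" [(PySem.Dict.get? (PySem.Dict.mk p) "nombre").getD "", " ", (PySem.Dict.get? (PySem.Dict.mk p) "categoria").getD ""])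
  palabras.foldl (fun s palabra => if PySem.Str.isIn palabra texto then s + 1 else s) 0

-- ===== PORT A =====
def buscar_productos (pregunta : String) (productos : List (List (String × String))) (max_resultados : Int) : List (List (String × String)) :=
  let palabras := PySem.Str.split₀ (PySem.Str.lower pregunta)
  let resultados := productos.foldl (fun acc p =>
    let puntaje := puntaje_de palabras p
    if puntaje > 0 then acc ++ [(puntaje, p)] else acc) []
  let ordenados := PySem.List.sorted resultados (fun x => x.1) true
  (PySem.List.slice ordenados none (some max_resultados)).map (fun x => x.2)

-- ===== PORT B =====
def buscar_productos_alt (pregunta : String) (productos : List (List (String × String))) (max_resultados : Int) : List (List (String × String)) :=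
  let palabras := PySem.Str.split₀ (PySem.Str.lower pregunta)
  let puntuados := productos.map (fun p => (puntaje_de palabras p, p))
  let res := (PySem.List.pyRange (palabras.length : Int) 0 (-1)).foldl (fun acc s =>
    puntuados.foldl (fun a2 sp => if sp.1 == s then a2 ++ [sp.2] else a2) acc) []
  PySem.List.slice res none (some max_resultados)

-- ===== PRECONDITION & SPEC =====
-- Pre_ excludes only products missing the "nombre" or "categoria" key, on which A raises KeyError.
def Pre_buscar_productos (pregunta : String) (productos : List (List (String × String))) (max_resultados : Int) : Prop :=
  ∀ p ∈ productos, (PySem.Dict.get? (PySem.Dict.mk p) "nombre").isSome = true ∧ (PySem.Dict.get? (PySem.Dict.mk p) "categoria").isSome = true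
instance (pregunta : String) (productos : List (List (String × String))) (max_resultados : Int) : Decidable (Pre_buscar_productos pregunta productos max_resultados) := by unfold Pre_buscar_productos; infer_instance

def pvWitness_buscar_productos : String × (List (List (String × String))) × Int :=
  ("laptop gamer", [[("nombre", "Laptop Gamer Pro"), ("categoria", "computo")], [("nombre", "Mouse"), ("categoria", "accesorios")]], 10)

def Spec_buscar_productos (pregunta : String) (productos : List (List (String × String))) (max_resultados : Int) (out : List (List (String × String))) : Prop := out = buscar_productos_alt pregunta productos max_resultados
instance (pregunta : String) (productos : List (List (String × String))) (max_resultados : Int) (out : List (List (String × String))) : Decidable (Spec_buscar_productos pregunta productos max_resultados out) := by unfold Spec_buscar_productos; infer_instance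

-- ===== CLAIM (what is proved, stated in full; the proofs are below) =====
def Claim_equal_buscar_productos : Prop := ∀ (pregunta : String) (productos : List (List (String × String))) (max_resultados : Int), Dom_buscar_productos pregunta productos max_resultados → Pre_buscar_productos pregunta productos max_resultados → Spec_buscar_productos pregunta productos max_resultados (buscar_productos pregunta productos max_resultados)

-- ===== LEMMAS AND PROOFS =====

-- slice depends on the input list only through its length and drop/take, so it commutes with map
theorem pv_slice_map {α β : Type} (g : α → β) (xs : List α) (a? b? : Option Int) :
    PySem.List.slice (xs.map g) a? b? = (PySem.List.slice xs a? b?).map g := by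
  simp [PySem.List.slice, List.map_take, List.map_drop]

-- the score is a count of matching words: 0 ≤ score ≤ len(palabras)
theorem pv_foldl_count_bounds (ws : List String) (c : String → Bool) :
    ∀ a : Int, a ≤ ws.foldl (fun s w => if c w then s + 1 else s) a ∧
      ws.foldl (fun s w => if c w then s + 1 else s) a ≤ a + ws.length := by
  induction ws with
  | nil => intro a; simp
  | cons w t ih =>
    intro a
    simp only [List.foldl_cons, List.length_cons]
    by_cases h : c w <;> simp only [h, if_true] <;>
      constructor <;> (first | exact le_trans (by omega) (ih _).1 | exact le_trans (ih _).2 (by push_cast; omega))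

theorem pv_puntaje_bounds (ws : List String) (p : List (String × String)) :
    0 ≤ puntaje_de ws p ∧ puntaje_de ws p ≤ (ws.length : Int) := by
  have h := pv_foldl_count_bounds ws (fun palabra => PySem.Str.isIn palabra (PySem.Str.lower (PySem.Str.join "" [(PySem.Dict.get? (PySem.Dict.mk p) "nombre").getD "", " ", (PySem.Dict.get? (PySem.Dict.mk p) "categoria").getD ""]))) 0
  simp only [puntaje_de]
  exact ⟨h.1, by omega⟩

theorem pv_insert_skip {α : Type} (before : α → α → Bool) (x : α) (as bs : List α)
    (h : ∀ y ∈ as, before x y = false) :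
    PySem.List.insertBy before x (as ++ bs) = as ++ PySem.List.insertBy before x bs := by
  induction as with
  | nil => simp
  | cons a t ih =>
    simp only [List.cons_append, PySem.List.insertBy, h a (by simp)]
    simp only [Bool.false_eq_true, if_false]
    rw [ih (fun y hy => h y (by simp [hy]))]

theorem pv_insert_front {α : Type} (before : α → α → Bool) (x : α) (ys : List α)
    (h : ∀ y ∈ ys, before x y = true) :
    PySem.List.insertBy before x ys = x :: ys := by
  cases ys with
  | nil => rfl
  | cons y t => simp [PySem.List.insertBy, h y (by simp)]

-- inserting x into the bucket concatenation appends it to the end of its own bucket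
theorem pv_ins_blocks {α : Type} (k : α → Int) (x : α) (ss : List Int) (l : List α)
    (hss : ss.Pairwise (fun a b => b < a)) (hx : k x ∈ ss) :
    PySem.List.insertBy (fun a b => decide (k b < k a)) x
      (ss.flatMap (fun s => l.filter (fun y => k y == s)))
    = ss.flatMap (fun s => (l ++ [x]).filter (fun y => k y == s)) := by
  induction ss with
  | nil => simp at hx
  | cons s ss ih =>
    rw [List.pairwise_cons] at hss
    obtain ⟨h1, h2⟩ := hss
    simp only [List.flatMap_cons]
    by_cases hxs : k x = s
    · -- x belongs to the head bucket
      rw [pv_insert_skip _ _ _ _ (by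
        intro y hy
        simp only [List.mem_filter, beq_iff_eq] at hy
        simp [hy.2, hxs])]
      rw [pv_insert_front _ _ _ (by
        intro y hy
        simp only [List.mem_flatMap, List.mem_filter, beq_iff_eq] at hy
        obtain ⟨s', hs', _, hks'⟩ := hy
        simp [hks', hxs]
        exact h1 s' hs')]
      have hfilt : ∀ s' ∈ ss, (l ++ [x]).filter (fun y => k y == s') = l.filter (fun y => k y == s') := by
        intro s' hs'
        rw [List.filter_append]
        have : (k x == s') = false := by simp [hxs]; have := h1 s' hs'; omega
        simp [this]
      have : ss.flatMap (fun s' => (l ++ [x]).filter (fun y => k y == s')) = ss.flatMap (fun s' => l.filter (fun y => k y == s')) := by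
        rw [List.flatMap, List.flatMap]
        exact congrArg List.flatten (List.map_congr_left hfilt)
      rw [this, List.filter_append]
      simp [hxs]
    · have hx' : k x ∈ ss := by rcases List.mem_cons.1 hx with h | h; omega; exact h
      rw [pv_insert_skip _ _ _ _ (by
        intro y hy
        simp only [List.mem_filter, beq_iff_eq] at hy
        have := h1 _ hx'
        simp [hy.2]
        omega)]
      rw [ih h2 hx']
      have : (l ++ [x]).filter (fun y => k y == s) = l.filter (fun y => k y == s) := by
        rw [List.filter_append]; simp [hxs]
      rw [this]

-- stable descending sort by an Int key = descending bucket concatenation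
theorem pv_blocks_sorted {α : Type} (k : α → Int) (ss : List Int) (l : List α)
    (hss : ss.Pairwise (fun a b => b < a)) (hl : ∀ x ∈ l, k x ∈ ss) :
    PySem.List.sorted l k true = ss.flatMap (fun s => l.filter (fun y => k y == s)) := by
  rw [PySem.List.sorted_rev_eq_foldl_insertBy]
  induction l using List.reverseRecOn with
  | nil => simp
  | append_singleton t x ih =>
    rw [List.foldl_append]
    simp only [List.foldl_cons, List.foldl_nil]
    rw [ih (fun y hy => hl y (by simp [hy]))]
    exact pv_ins_blocks k x ss t hss (hl x (by simp))

theorem pv_filter_map_pos {α : Type} (f : α → Int) (prods : List α) (s : Int) (hs : 0 < s) :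
    ((prods.filter (fun q => decide (f q > 0))).map (fun q => (f q, q))).filter (fun y => y.1 == s)
    = (prods.map (fun q => (f q, q))).filter (fun y => y.1 == s) := by
  induction prods with
  | nil => simp
  | cons q t ih =>
    by_cases h : f q > 0
    · simp [h, List.filter_cons, ih]
    · have : (f q == s) = false := by simp; omega
      simp [h, this, ih]

-- ===== VERDICT (by name: the statement is the Claim_ definition above) =====
theorem buscar_productos_spec : Claim_equal_buscar_productos := by
  intro pregunta productos m _hdom _hpre
  unfold Spec_buscar_productos
  unfold buscar_productos buscar_productos_alt
  simp only []
  set pal := PySem.Str.split₀ (PySem.Str.lower pregunta) with hpal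
  rw [PySem.List.foldl_append_ite (fun q => puntaje_de pal q > 0) (fun q => (puntaje_de pal q, q)) productos []]
  simp only [PySem.List.foldl_append_if (fun sp : Int × List (String × String) => sp.1 == _) Prod.snd]
  rw [List.nil_append, PySem.List.foldl_append_eq_flatMap, List.nil_append]
  rw [← pv_slice_map]
  refine congrArg (fun z => PySem.List.slice z none (some m)) ?_
  have hss : (PySem.List.pyRange ((pal.length : Int)) 0 (-1)).Pairwise (fun a b => b < a) := by
    rw [PySem.List.pyRange_neg_one_eq_reverse, List.pairwise_reverse]
    exact PySem.List.pairwise_lt_pyRange_one _ _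
  have hl : ∀ x ∈ (productos.filter (fun x => decide (puntaje_de pal x > 0))).map (fun q => (puntaje_de pal q, q)),
      x.1 ∈ PySem.List.pyRange ((pal.length : Int)) 0 (-1) := by
    intro x hx
    simp only [List.mem_map, List.mem_filter, decide_eq_true_eq] at hx
    obtain ⟨q, ⟨hq, hq0⟩, rfl⟩ := hx
    rw [PySem.List.mem_pyRange_neg_one]
    exact ⟨hq0, (pv_puntaje_bounds pal q).2⟩
  rw [pv_blocks_sorted (fun x : Int × List (String × String) => x.1) (PySem.List.pyRange ((pal.length : Int)) 0 (-1)) ((productos.filter (fun x => decide (puntaje_de pal x > 0))).map (fun q => (puntaje_de pal q, q))) hss hl]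
  rw [List.map_flatMap]
  rw [List.flatMap, List.flatMap]
  refine congrArg List.flatten (List.map_congr_left ?_)
  intro s hs
  rw [PySem.List.mem_pyRange_neg_one] at hs
  rw [pv_filter_map_pos (puntaje_de pal) productos s hs.1]
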